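-- pv_equiv track=rewrite | github.com/pyk-kentech/GNN | utils/sigma_project_to_paths.py | enumerate_paths
-- ===== SOURCE A (Python) =====
-- from typing import Any, Dict, List, Tuple, Optional
--
-- def enumerate_paths(children, root: str, max_depth: int) -> List[List[str]]:
--     paths = []
--     def dfs(cur, path):
--         if (len(path)-1) >= max_depth or cur not in children:
--             paths.append(path); return
--         for nxt in children[cur]:
--             if nxt in path:  # cycle guard
--                 continue
--             dfs(nxt, path + [nxt])
--     dfs(root, [root])
--     return paths
-- ===== SOURCE B (Python) =====
-- def enumerate_paths(children, root, max_depth):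
--     paths = []
--     stack = [(root, [root])]
--     while stack:
--         cur, path = stack.pop()
--         if (len(path) - 1) >= max_depth or cur not in children:
--             paths.append(path)
--             continue
--         for nxt in reversed(children[cur]):
--             if nxt not in path:
--                 stack.append((nxt, path + [nxt]))
--     return paths
-- ===== Notes on version B (the rewrite author's own statement) =====
-- stated objective: alternative
-- what changed: Replaces the recursive nested dfs helper appending to a closure variable with an iterative explicit LIFO stack of (node, path) frames, pushing children in reversed order to preserve the leftmost-first pre-order of paths.
import Mathlib
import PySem

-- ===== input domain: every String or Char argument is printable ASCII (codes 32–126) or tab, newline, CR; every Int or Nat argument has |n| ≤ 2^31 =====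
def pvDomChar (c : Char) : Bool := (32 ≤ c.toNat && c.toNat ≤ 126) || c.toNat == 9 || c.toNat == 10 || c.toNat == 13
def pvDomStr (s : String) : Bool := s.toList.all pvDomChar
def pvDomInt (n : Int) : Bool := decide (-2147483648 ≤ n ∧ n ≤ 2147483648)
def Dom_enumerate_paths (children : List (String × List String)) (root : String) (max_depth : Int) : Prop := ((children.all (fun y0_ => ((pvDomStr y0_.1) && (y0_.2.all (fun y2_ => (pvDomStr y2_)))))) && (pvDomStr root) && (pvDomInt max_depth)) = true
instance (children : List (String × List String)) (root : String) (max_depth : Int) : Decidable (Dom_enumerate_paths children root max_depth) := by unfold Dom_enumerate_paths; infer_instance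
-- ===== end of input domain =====

-- B replaces A's recursive inner dfs by an explicit LIFO stack of (node, path) frames
-- (children pushed in reversed order to keep pre-order); same return value, no speed claim.
-- Both ports carry a Nat fuel solely to make the computation total in Lean: fuel
-- (pvFuel = 2 + total number of child entries) exceeds the length of any duplicate-free
-- path, which is the recursion/stack depth bound enforced by the cycle guard.

-- ===== PORT A =====
-- total child-entry count; 2 + this bounds the length of any cycle-free path
def pvFuel (children : List (String × List String)) : Nat :=
  (children.map (fun p => p.2.length)).sum + 2

-- recursive dfs of A (fuel is the totalisation guard, never exhausted in practice)
def pvDfsA (children : List (String × List String)) (max_depth : Int) :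
    Nat → String → List String → List (List String)
  | 0, _, path => [path]
  | fuel+1, cur, path =>
    if ((path.length : Int) - 1 ≥ max_depth) ∨ ((PySem.Dict.mk children).get? cur) = none then
      [path]
    else
      (((PySem.Dict.mk children).get? cur).getD []).foldl
        (fun acc nxt =>
          if nxt ∈ path then acc
          else acc ++ pvDfsA children max_depth fuel nxt (path ++ [nxt])) []

def enumerate_paths (children : List (String × List String)) (root : String) (max_depth : Int) : List (List String) :=
  pvDfsA children max_depth (pvFuel children) root [root]

-- ===== PORT B =====
-- value lists looked up in the dict are no longer than the total child-entry count
theorem pvGet?_len_le (children : List (String × List String)) (cur : String)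
    (cs : List String) (h : (PySem.Dict.mk children).get? cur = some cs) :
    cs.length ≤ (children.map (fun p => p.2.length)).sum := by
  induction children with
  | nil => simp [PySem.Dict.get?] at h
  | cons p rest ih =>
    rw [PySem.Dict.get?_mk_cons] at h
    by_cases hk : (p.1 == cur) = true
    · simp [hk] at h; subst h; simp
    · simp [hk] at h
      have := ih h
      simp; omega


-- measure bound for the frames pushed by one loop step (used only for termination)
theorem pvMeasure_foldr (children : List (String × List String)) (f : Nat) (path : List String)
    (cs : List String) (stack : List (Nat × String × List String)) :
    (((cs.foldr (fun nxt st => if nxt ∈ path then st else (f, nxt, path ++ [nxt]) :: st) stack).map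
        (fun t => (pvFuel children) ^ t.1)).sum)
      ≤ cs.length * (pvFuel children) ^ f + ((stack.map (fun t => (pvFuel children) ^ t.1)).sum) := by
  induction cs with
  | nil => simp
  | cons c cs ih =>
    simp only [List.foldr_cons, List.length_cons]
    by_cases h : c ∈ path
    · simp only [if_pos h]; calc _ ≤ _ := ih
        _ ≤ _ := by ring_nf; nlinarith [Nat.pow_pos (n := f) (show 0 < pvFuel children by unfold pvFuel; omega)]
    · simp only [if_neg h, List.map_cons, List.sum_cons]
      have := ih
      ring_nf
      ring_nf at this
      omega

-- explicit-stack loop of B; each frame carries its remaining fuel (totalisation guard)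
def pvLoopB (children : List (String × List String)) (max_depth : Int) :
    List (Nat × String × List String) → List (List String) → List (List String)
  | [], acc => acc
  | (fuel, cur, path) :: stack, acc =>
    if fuel = 0 ∨ ((path.length : Int) - 1 ≥ max_depth) ∨ ((PySem.Dict.mk children).get? cur) = none then
      pvLoopB children max_depth stack (acc ++ [path])
    else
      pvLoopB children max_depth
        ((((PySem.Dict.mk children).get? cur).getD []).reverse.foldl
          (fun st nxt => if nxt ∈ path then st else (fuel - 1, nxt, path ++ [nxt]) :: st) stack)
        acc
  termination_by stack _ => (stack.map (fun t => (pvFuel children) ^ t.1)).sum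
  decreasing_by
  · simp
    have : 0 < pvFuel children ^ fuel := Nat.pow_pos (by unfold pvFuel; omega)
    omega
  · rename_i hcond
    push Not at hcond
    obtain ⟨hf, _, hget⟩ := hcond
    rw [List.foldl_reverse]
    simp only [dite_eq_ite]
    obtain ⟨cs, hcs⟩ : ∃ cs, (PySem.Dict.mk children).get? cur = some cs :=
      Option.ne_none_iff_exists'.mp hget
    have hlen : cs.length ≤ (children.map (fun p => p.2.length)).sum := pvGet?_len_le _ _ _ hcs
    rw [hcs]
    simp only [Option.getD_some]
    have hb := pvMeasure_foldr children (fuel - 1) path cs stack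
    have hpow : 0 < pvFuel children ^ (fuel - 1) := Nat.pow_pos (by unfold pvFuel; omega)
    have hK : cs.length < pvFuel children := by unfold pvFuel; omega
    have hstep : cs.length * pvFuel children ^ (fuel - 1) < pvFuel children ^ fuel := by
      have h1 : cs.length * pvFuel children ^ (fuel - 1) < pvFuel children * pvFuel children ^ (fuel - 1) :=
        Nat.mul_lt_mul_of_lt_of_le hK le_rfl hpow
      have h2 : pvFuel children * pvFuel children ^ (fuel - 1) = pvFuel children ^ fuel := by
        rw [← pow_succ']
        congr 1
        omega
      omega
    simp only [List.map_cons, List.sum_cons]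
    omega

def enumerate_paths_alt (children : List (String × List String)) (root : String) (max_depth : Int) : List (List String) :=
  pvLoopB children max_depth [(pvFuel children, root, [root])] []

-- ===== PRECONDITION & SPEC =====
def Spec_enumerate_paths (children : List (String × List String)) (root : String) (max_depth : Int) (out : List (List String)) : Prop := out = enumerate_paths_alt children root max_depth
instance (children : List (String × List String)) (root : String) (max_depth : Int) (out : List (List String)) : Decidable (Spec_enumerate_paths children root max_depth out) := by unfold Spec_enumerate_paths; infer_instance

-- ===== CLAIM (what is proved, stated in full; the proofs are below) =====
def Claim_equal_enumerate_paths : Prop := ∀ (children : List (String × List String)) (root : String) (max_depth : Int), Dom_enumerate_paths children root max_depth → Spec_enumerate_paths children root max_depth (enumerate_paths children root max_depth)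

-- ===== LEMMAS AND PROOFS =====

-- A's inner loop: skipped elements contribute nothing, the rest concatenate their results
theorem pvFoldl_if_flatMap {α : Type} (l path : List String) (g : String → List α) (a : List α) :
    l.foldl (fun acc nxt => if nxt ∈ path then acc else acc ++ g nxt) a
      = a ++ (l.filter (fun nxt => decide (nxt ∉ path))).flatMap g := by
  induction l generalizing a with
  | nil => simp
  | cons c l ih =>
    simp only [List.foldl_cons, List.filter_cons]
    by_cases h : c ∈ path
    · simp [h, ih]
    · simp [h, ih]

-- B's reversed push loop builds exactly the frames of the surviving children, in order
theorem pvRevFoldl_frames (cs path : List String) (f : Nat)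
    (stack : List (Nat × String × List String)) :
    cs.reverse.foldl (fun st nxt => if nxt ∈ path then st else (f, nxt, path ++ [nxt]) :: st) stack
      = (cs.filter (fun n => decide (n ∉ path))).map (fun n => (f, n, path ++ [n])) ++ stack := by
  rw [List.foldl_reverse]
  induction cs with
  | nil => simp
  | cons c cs ih =>
    simp only [List.foldr_cons, List.filter_cons]
    by_cases h : c ∈ path
    · simp [h, ih]
    · simp [h, ih]

-- the stack loop computes the concatenation of the dfs results of its frames
theorem pvLoop_eq (children : List (String × List String)) (max_depth : Int)
    (stack : List (Nat × String × List String)) (acc : List (List String)) :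
    pvLoopB children max_depth stack acc
      = acc ++ stack.flatMap (fun t => pvDfsA children max_depth t.1 t.2.1 t.2.2) := by
  induction stack, acc using pvLoopB.induct children max_depth with
  | case1 acc => simp [pvLoopB]
  | case2 fuel cur path stack acc h ih =>
    rw [pvLoopB, if_pos h, ih]
    have hleaf : pvDfsA children max_depth fuel cur path = [path] := by
      rcases h with h0 | hc
      · subst h0; rfl
      · cases fuel with
        | zero => rfl
        | succ nf => rw [pvDfsA, if_pos hc]
    simp [hleaf]
  | case3 fuel cur path stack acc h ih =>
    simp only [dite_eq_ite] at ih
    rw [pvLoopB, if_neg h, ih]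
    push Not at h
    obtain ⟨hf, hd, hget⟩ := h
    obtain ⟨cs, hcs⟩ : ∃ cs, (PySem.Dict.mk children).get? cur = some cs :=
      Option.ne_none_iff_exists'.mp hget
    obtain ⟨nf, rfl⟩ : ∃ nf, fuel = nf + 1 := ⟨fuel - 1, (Nat.succ_pred_eq_of_ne_zero hf).symm⟩
    rw [hcs]
    simp only [Option.getD_some, Nat.add_sub_cancel]
    rw [pvRevFoldl_frames]
    have hdfs : pvDfsA children max_depth (nf + 1) cur path
        = (cs.filter (fun n => decide (n ∉ path))).flatMap
            (fun n => pvDfsA children max_depth nf n (path ++ [n])) := by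
      rw [pvDfsA, if_neg (by simp [hcs]; omega), hcs]
      simp only [Option.getD_some]
      rw [pvFoldl_if_flatMap]
      simp
    simp [hdfs, List.flatMap_append, List.flatMap_map]

-- ===== VERDICT (by name: the statement is the Claim_ definition above) =====
theorem enumerate_paths_spec : Claim_equal_enumerate_paths := by
  intro children root max_depth _
  show enumerate_paths children root max_depth = enumerate_paths_alt children root max_depth
  rw [enumerate_paths, enumerate_paths_alt, pvLoop_eq]
  simp
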